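-- pv_equiv track=rewrite | github.com/ingolfurorri/HR-assignments | paragraph_analysis.py | get_word_index
-- ===== SOURCE A (Python) =====
-- def get_word_index(word, word_list):
--     '''Finds and creates a string that represent in what paragraphs the word appears in'''
--     word_index = word
--     for index in range(len(word_list)):
--         if word in word_list[index]:
--             #If it is the first appearance, we don't want the comma
--             if word_index == word:
--                 word_index += ' {}'.format(index+1)
--             else:
--                 word_index += ', {}'.format(index+1)
--
--     return word_index
-- ===== SOURCE B (Python) =====
-- def get_word_index(word, word_list):
--     '''Finds and creates a string that represent in what paragraphs the word appears in'''
--     def tail(i):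
--         # recursively build the ', '-prefixed numbers of all matching paragraphs from i on
--         if i == len(word_list):
--             return ''
--         rest = tail(i + 1)
--         if word in word_list[i]:
--             return ', ' + str(i + 1) + rest
--         return rest
--     t = tail(0)
--     if not t:
--         return word
--     return word + ' ' + t[2:]
-- ===== Notes on version B (the rewrite author's own statement) =====
-- stated objective: alternative
-- what changed: B builds the result back-to-front with a recursive helper that returns the ', '-prefixed numbers of all matching paragraphs from position i on, then strips the leading ', ' with a slice and prepends word + ' ', eliminating A's forward accumulator loop and its first-appearance flag.
import Mathlib
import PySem

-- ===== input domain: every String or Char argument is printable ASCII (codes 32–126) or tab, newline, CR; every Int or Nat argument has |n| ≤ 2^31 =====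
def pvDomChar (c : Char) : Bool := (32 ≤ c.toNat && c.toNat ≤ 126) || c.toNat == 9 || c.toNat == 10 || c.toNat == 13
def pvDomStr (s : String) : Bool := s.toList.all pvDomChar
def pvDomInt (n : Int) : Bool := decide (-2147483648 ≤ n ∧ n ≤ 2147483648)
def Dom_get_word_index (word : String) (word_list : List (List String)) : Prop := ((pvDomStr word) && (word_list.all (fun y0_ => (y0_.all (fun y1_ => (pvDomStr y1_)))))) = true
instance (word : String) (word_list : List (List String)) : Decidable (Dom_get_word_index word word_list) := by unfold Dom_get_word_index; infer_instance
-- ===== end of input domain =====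

-- B rebuilds the result recursively back-to-front: a recursive helper returns the ', '-prefixed
-- numbers of all matching paragraphs from position i on, and the top level strips the leading
-- ', ' and prepends word + ' ', replacing A's forward loop with its first-appearance flag
-- (objective: alternative).

-- ===== PORT A =====
-- the growing string word_index is kept as List Char (Lean's String.append is kernel-opaque)
def get_word_index (word : String) (word_list : List (List String)) : String :=
  let word_index :=
    (PySem.List.pyRange 0 word_list.length 1).foldl
      (fun acc index =>
        if (PySem.List.pyGetD word_list index []).contains word then
          if acc == word.toList then
            acc ++ (' ' :: PySem.Int.toChars (index + 1))
          else
            acc ++ (',' :: ' ' :: PySem.Int.toChars (index + 1))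
        else acc)
      word.toList
  String.ofList word_index

-- ===== PORT B =====
-- Python's inner `tail(i)` recursion: each call consumes word_list[i], so it is the obvious
-- structural recursion over the remaining paragraphs carrying the index i
def pvTailB (word : String) (i : Int) (ps : List (List String)) : List Char :=
  match ps with
  | [] => []
  | p :: t =>
    let rest := pvTailB word (i + 1) t
    if p.contains word then ',' :: ' ' :: PySem.Int.toChars (i + 1) ++ rest else rest

def get_word_index_alt (word : String) (word_list : List (List String)) : String :=
  let t := pvTailB word 0 word_list
  if t = [] then word
  else String.ofList (word.toList ++ ' ' :: PySem.List.slice t (some 2) none)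

-- ===== PRECONDITION & SPEC =====
def Spec_get_word_index (word : String) (word_list : List (List String)) (out : String) : Prop := out = get_word_index_alt word word_list
instance (word : String) (word_list : List (List String)) (out : String) : Decidable (Spec_get_word_index word word_list out) := by unfold Spec_get_word_index; infer_instance

-- ===== CLAIM (what is proved, stated in full; the proofs are below) =====
def Claim_equal_get_word_index : Prop := ∀ (word : String) (word_list : List (List String)), Dom_get_word_index word word_list → Spec_get_word_index word word_list (get_word_index word word_list)

-- ===== LEMMAS AND PROOFS =====

-- A's loop, abstracted: append each match to the accumulator, comma unless it is the first
def pvJoinA (rest : List Char) (ms : List (List Char)) : List Char :=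
  match ms with
  | [] => rest
  | m :: t => pvJoinA (rest ++ (if rest = [] then ' ' :: m else ',' :: ' ' :: m)) t

-- ", "-prefixed pieces, one per match
def pvSep (ms : List (List Char)) : List Char :=
  match ms with
  | [] => []
  | m :: t => ',' :: ' ' :: m ++ pvSep t

lemma pvJoinA_of_ne_nil (rest : List Char) (h : rest ≠ []) (ms : List (List Char)) :
    pvJoinA rest ms = rest ++ pvSep ms := by
  induction ms generalizing rest with
  | nil => simp [pvJoinA, pvSep]
  | cons m t ih =>
    simp only [pvJoinA, pvSep, if_neg h]
    rw [ih _ (by simp)]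
    simp

lemma pvLoop_eq (word : String) (xs : List (Int × List String)) (rest : List Char) :
    xs.foldl
      (fun acc p =>
        if p.2.contains word then
          if acc == word.toList then
            acc ++ (' ' :: PySem.Int.toChars (p.1 + 1))
          else
            acc ++ (',' :: ' ' :: PySem.Int.toChars (p.1 + 1))
        else acc)
      (word.toList ++ rest)
    = word.toList ++
        pvJoinA rest
          ((xs.filter (fun p => p.2.contains word)).map
            (fun p => PySem.Int.toChars (p.1 + 1))) := by
  induction xs generalizing rest with
  | nil => simp [pvJoinA]
  | cons x t ih =>
    simp only [List.foldl_cons, List.filter_cons]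
    by_cases hc : x.2.contains word
    · simp only [hc, if_pos, List.map_cons, pvJoinA]
      by_cases hr : rest = []
      · subst hr
        simpa using ih (' ' :: PySem.Int.toChars (x.1 + 1))
      · have hne : (word.toList ++ rest == word.toList) = false := by
          rw [beq_eq_false_iff_ne]
          exact fun h => hr (List.append_cancel_left (h.trans (List.append_nil _).symm))
        rw [if_neg (by simp [hne]), if_neg hr]
        simpa using ih (rest ++ ',' :: ' ' :: PySem.Int.toChars (x.1 + 1))
    · simp only [hc]
      simpa using ih rest

-- B's recursion computes exactly the ", "-prefixed pieces of the matches from index s on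
lemma pvTailB_eq (word : String) (ps : List (List String)) (s : Int) :
    pvTailB word s ps
      = pvSep (((PySem.List.enumerate ps s).filter (fun p => p.2.contains word)).map
          (fun p => PySem.Int.toChars (p.1 + 1))) := by
  induction ps generalizing s with
  | nil => simp [pvTailB, PySem.List.enumerate_nil, pvSep]
  | cons p t ih =>
    rw [pvTailB, PySem.List.enumerate_cons, List.filter_cons]
    by_cases hc : p.contains word
    · simp only [hc, if_pos, List.map_cons, pvSep, ih]
    · simp only [hc]
      simpa using ih (s + 1)

-- ===== VERDICT (by name: the statement is the Claim_ definition above) =====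
theorem get_word_index_spec : Claim_equal_get_word_index := by
  intro word word_list _
  unfold Spec_get_word_index get_word_index get_word_index_alt
  have hA : (PySem.List.pyRange 0 (word_list.length : Int) 1).foldl
      (fun acc index => if (PySem.List.pyGetD word_list index []).contains word then
          (if acc == word.toList then acc ++ ' ' :: PySem.Int.toChars (index + 1)
           else acc ++ ',' :: ' ' :: PySem.Int.toChars (index + 1)) else acc) word.toList
    = (PySem.List.enumerate word_list).foldl
      (fun acc p => if p.2.contains word then
          (if acc == word.toList then acc ++ ' ' :: PySem.Int.toChars (p.1 + 1)
           else acc ++ ',' :: ' ' :: PySem.Int.toChars (p.1 + 1)) else acc) word.toList := by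
    rw [show (word_list.length : Int) = PySem.List.len word_list from rfl,
        PySem.List.enumerate_eq_map_pyRange word_list ([] : List String), List.foldl_map]
  have hL := pvLoop_eq word (PySem.List.enumerate word_list) []
  rw [List.append_nil] at hL
  rw [hA, hL, pvTailB_eq]
  set ms := (((PySem.List.enumerate word_list 0).filter (fun p => p.2.contains word)).map
      (fun p => PySem.Int.toChars (p.1 + 1))) with hms
  by_cases hm : ms = []
  · rw [hm]
    show String.ofList (word.toList ++ pvJoinA [] []) = if pvSep [] = [] then word else _
    simp only [pvJoinA, pvSep, List.append_nil]
    exact String.ofList_toList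
  · obtain ⟨m, t, hmt⟩ := List.exists_cons_of_ne_nil hm
    rw [hmt]
    show String.ofList (word.toList ++ pvJoinA [] (m :: t)) = _
    rw [show pvJoinA [] (m :: t) = pvJoinA (' ' :: m) t from by simp [pvJoinA],
        pvJoinA_of_ne_nil _ (by simp)]
    rw [if_neg (by simp [pvSep])]
    have h2 : PySem.List.slice (pvSep (m :: t)) (some 2) none = m ++ pvSep t := by
      rw [PySem.List.slice_from]
      · simp [pvSep]
      · norm_num
    rw [h2]
    simp
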